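-- pv_equiv track=rewrite | github.com/anon8597299/smart-tech-innovations | agents/security.py | _format_email
-- ===== SOURCE A (Python) =====
-- def _format_email(findings: list[dict]) -> str:
--     critical = [f for f in findings if f.get("severity") == "critical"]
--     high     = [f for f in findings if f.get("severity") == "high"]
--     lines = ["IYS Security Manager — Alert\n"]
--     for sev, group in [("CRITICAL", critical), ("HIGH", high)]:
--         for f in group:
--             lines.append(f"[{sev}] {f['title']}")
--             lines.append(f"  Location: {f.get('location','?')}")
--             lines.append(f"  Detail:   {f.get('detail','')}")
--             lines.append(f"  Fix:      {f.get('fix','')}")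
--             lines.append("")
--     return "\n".join(lines)
-- ===== SOURCE B (Python) =====
-- def _format_email(findings: list[dict]) -> str:
--     prio = {"critical": 0, "high": 1}
--     label = {"critical": "CRITICAL", "high": "HIGH"}
--     sel = sorted((f for f in findings if f.get("severity") in prio),
--                  key=lambda f: prio[f.get("severity")])
--     parts = ["IYS Security Manager — Alert\n"]
--     for f in sel:
--         parts.append(f"[{label[f.get('severity')]}] {f['title']}")
--         parts.append(f"  Location: {f.get('location','?')}")
--         parts.append(f"  Detail:   {f.get('detail','')}")
--         parts.append(f"  Fix:      {f.get('fix','')}")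
--         parts.append("")
--     return "\n".join(parts)
-- ===== Notes on version B (the rewrite author's own statement) =====
-- stated objective: alternative
-- what changed: Replaces A's two severity-filter passes and nested two-group loop with one priority map, a single filtered selection stably sorted by priority, and one formatting pass deriving each label from the finding's severity.
import Mathlib
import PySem

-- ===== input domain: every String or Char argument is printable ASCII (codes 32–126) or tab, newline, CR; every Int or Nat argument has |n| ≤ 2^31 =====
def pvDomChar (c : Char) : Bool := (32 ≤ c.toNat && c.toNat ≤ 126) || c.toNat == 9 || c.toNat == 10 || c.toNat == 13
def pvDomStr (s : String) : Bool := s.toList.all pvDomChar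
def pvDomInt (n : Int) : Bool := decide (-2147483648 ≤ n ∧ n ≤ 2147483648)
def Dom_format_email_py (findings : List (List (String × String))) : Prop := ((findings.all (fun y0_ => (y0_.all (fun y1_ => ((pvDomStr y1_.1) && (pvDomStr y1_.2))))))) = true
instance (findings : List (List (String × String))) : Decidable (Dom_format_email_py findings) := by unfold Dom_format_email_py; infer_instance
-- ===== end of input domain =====

-- B replaces A's two severity-filter passes and nested two-group loop by one stable sort on a
-- severity-priority map followed by a single formatting pass (alternative decomposition, not faster).
-- Pre_ excludes inputs where A raises KeyError (a critical/high finding without a "title" key).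


-- ===== PORT A =====
-- f['title'] (KeyError when absent) is ported as getD with "" — Pre_ excludes exactly those inputs.
def format_email_py (findings : List (List (String × String))) : String :=
  let critical := findings.filter (fun f => PySem.Dict.get? (PySem.Dict.mk f) "severity" == some "critical")
  let high := findings.filter (fun f => PySem.Dict.get? (PySem.Dict.mk f) "severity" == some "high")
  let lines := [("CRITICAL", critical), ("HIGH", high)].foldl (fun lines sg =>
    sg.2.foldl (fun lines f =>
      lines ++ ["[" ++ sg.1 ++ "] " ++ PySem.Dict.getD (PySem.Dict.mk f) "title" "",
                "  Location: " ++ PySem.Dict.getD (PySem.Dict.mk f) "location" "?",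
                "  Detail:   " ++ PySem.Dict.getD (PySem.Dict.mk f) "detail" "",
                "  Fix:      " ++ PySem.Dict.getD (PySem.Dict.mk f) "fix" "",
                ""]) lines)
    ["IYS Security Manager — Alert\n"]
  PySem.Str.join "\n" lines

-- ===== PORT B =====
def pvPrio : PySem.Dict String Int := PySem.Dict.mk [("critical", 0), ("high", 1)]
def pvLabel : PySem.Dict String String := PySem.Dict.mk [("critical", "CRITICAL"), ("high", "HIGH")]
-- Python's f.get("severity") yields None when absent; None and "" alike miss both dicts, so
-- collapsing None to "" is exact here.  prio[...] / label[...] inside the loop are only reached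
-- with the key present (the list was filtered), so the getD defaults are never used.
def pvSev (f : List (String × String)) : String := (PySem.Dict.get? (PySem.Dict.mk f) "severity").getD ""
def format_email_py_alt (findings : List (List (String × String))) : String :=
  let sel := PySem.List.sorted
    (findings.filter (fun f => (PySem.Dict.get? pvPrio (pvSev f)).isSome))
    (fun f => PySem.Dict.getD pvPrio (pvSev f) 1) false
  let parts := sel.foldl (fun parts f =>
      parts ++ ["[" ++ PySem.Dict.getD pvLabel (pvSev f) "" ++ "] " ++ PySem.Dict.getD (PySem.Dict.mk f) "title" "",
                "  Location: " ++ PySem.Dict.getD (PySem.Dict.mk f) "location" "?",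
                "  Detail:   " ++ PySem.Dict.getD (PySem.Dict.mk f) "detail" "",
                "  Fix:      " ++ PySem.Dict.getD (PySem.Dict.mk f) "fix" "",
                ""])
    ["IYS Security Manager — Alert\n"]
  PySem.Str.join "\n" parts

-- ===== PRECONDITION & SPEC =====
-- Pre_ excludes exactly the inputs on which A raises KeyError: a finding whose severity is
-- "critical" or "high" but which has no "title" key.
def Pre_format_email_py (findings : List (List (String × String))) : Prop :=
  (findings.all (fun f =>
    !((PySem.Dict.get? (PySem.Dict.mk f) "severity" == some "critical") ||
      (PySem.Dict.get? (PySem.Dict.mk f) "severity" == some "high")) ||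
    (PySem.Dict.get? (PySem.Dict.mk f) "title").isSome)) = true
instance (findings : List (List (String × String))) : Decidable (Pre_format_email_py findings) := by unfold Pre_format_email_py; infer_instance
def pvWitness_format_email_py : (List (List (String × String))) :=
  [[("severity", "critical"), ("title", "SQL injection"), ("location", "app.py")],
   [("severity", "low")],
   [("severity", "high"), ("title", "XSS"), ("fix", "escape output")]]
def Spec_format_email_py (findings : List (List (String × String))) (out : String) : Prop := out = format_email_py_alt findings
instance (findings : List (List (String × String))) (out : String) : Decidable (Spec_format_email_py findings out) := by unfold Spec_format_email_py; infer_instance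

-- ===== CLAIM (what is proved, stated in full; the proofs are below) =====
def Claim_equal_format_email_py : Prop := ∀ (findings : List (List (String × String))), Dom_format_email_py findings → Pre_format_email_py findings → Spec_format_email_py findings (format_email_py findings)

-- ===== LEMMAS AND PROOFS =====

-- insertBy into c ++ h when x goes exactly between c and h
theorem pv_insertBy_mid {α : Type} (bef : α → α → Bool) (x : α) (c h : List α)
    (hc : ∀ y ∈ c, bef x y = false) (hh : ∀ y, h.head? = some y → bef x y = true) :
    PySem.List.insertBy bef x (c ++ h) = c ++ x :: h := by
  induction c with
  | nil =>
    simp only [List.nil_append]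
    cases h with
    | nil => simp [PySem.List.insertBy]
    | cons y t => simp [PySem.List.insertBy, hh y rfl]
  | cons z c ih =>
    have hz : bef x z = false := hc z (by simp)
    simp only [List.cons_append, PySem.List.insertBy, hz]
    simp only [Bool.false_eq_true, if_false, List.cons.injEq, true_and]
    exact ih (fun y hy => hc y (by simp [hy]))

-- invariant of the insertion-sort fold for a {0,1}-valued key
theorem pv_foldl_ins {α : Type} (key : α → Int) (xs : List α) :
    ∀ c h : List α, (∀ x ∈ xs, key x = 0 ∨ key x = 1) →
    (∀ y ∈ c, key y = 0) → (∀ y ∈ h, key y = 1) →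
    xs.foldl (fun acc x => PySem.List.insertBy (fun a b => decide (key a < key b)) x acc) (c ++ h)
      = (c ++ xs.filter (fun x => key x == 0)) ++ (h ++ xs.filter (fun x => key x == 1)) := by
  induction xs with
  | nil => intro c h _ _ _; simp
  | cons x xs ih =>
    intro c h hx hc hh
    have hx' : ∀ y ∈ xs, key y = 0 ∨ key y = 1 := fun y hy => hx y (by simp [hy])
    rcases hx x (by simp) with h0 | h1
    · have step : PySem.List.insertBy (fun a b => decide (key a < key b)) x (c ++ h)
          = (c ++ [x]) ++ h := by
        rw [pv_insertBy_mid]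
        · simp
        · intro y hy; simp [hc y hy, h0]
        · intro y hy
          have : y ∈ h := List.mem_of_mem_head? hy
          simp [hh y this, h0]
      simp only [List.foldl_cons, step]
      rw [ih (c ++ [x]) h hx'
        (by intro y hy; rcases List.mem_append.mp hy with h' | h'
            · exact hc y h'
            · simp at h'; subst h'; exact h0) hh]
      simp [h0]
    · have step : PySem.List.insertBy (fun a b => decide (key a < key b)) x (c ++ h)
          = c ++ (h ++ [x]) := by
        have : ∀ y ∈ c ++ h, (fun a b => decide (key a < key b)) x y = false := by
          intro y hy
          rcases List.mem_append.mp hy with h' | h'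
          · simp [hc y h', h1]
          · simp [hh y h', h1]
        rw [PySem.List.insertBy_of_forall_not_before _ _ _ this]; simp
      simp only [List.foldl_cons, step]
      rw [ih c (h ++ [x]) hx' hc
        (by intro y hy; rcases List.mem_append.mp hy with h' | h'
            · exact hh y h'
            · simp at h'; subst h'; exact h1)]
      have h1' : (key x == 0) = false := by simp [h1]
      simp [h1]

-- stable sort of a list whose key takes only values 0 and 1
theorem pv_sorted_two_valued {α : Type} (key : α → Int) (xs : List α)
    (hx : ∀ x ∈ xs, key x = 0 ∨ key x = 1) :
    PySem.List.sorted xs key false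
      = xs.filter (fun x => key x == 0) ++ xs.filter (fun x => key x == 1) := by
  rw [PySem.List.sorted_eq_foldl_insertBy]
  have := pv_foldl_ins key xs [] [] hx (by simp) (by simp)
  simpa using this

theorem pv_flatMap_congr {α β : Type} (g g' : α → List β) :
    ∀ (l : List α), (∀ x ∈ l, g x = g' x) → l.flatMap g = l.flatMap g' := by
  intro l h
  induction l with
  | nil => rfl
  | cons x t ih =>
    simp only [List.flatMap_cons, h x (by simp), ih (fun y hy => h y (by simp [hy]))]

theorem pv_prio_get (s : String) :
    PySem.Dict.get? pvPrio s
      = if s = "critical" then some 0 else if s = "high" then some 1 else none := by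
  by_cases h1 : s = "critical"
  · subst h1; decide
  · by_cases h2 : s = "high"
    · subst h2; decide
    · simp [pvPrio, PySem.Dict.get?, h1, h2, Ne.symm h1, Ne.symm h2]

-- the combined selection+priority tests of B coincide with A's two severity tests
theorem pv_crit_point (f : List (String × String)) :
    ((PySem.Dict.getD pvPrio (pvSev f) 1 == 0) && (PySem.Dict.get? pvPrio (pvSev f)).isSome)
      = (PySem.Dict.get? (PySem.Dict.mk f) "severity" == some "critical") := by
  cases ho : PySem.Dict.get? (PySem.Dict.mk f) "severity" with
  | none => simp [pvSev, ho, PySem.Dict.getD, pv_prio_get]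
  | some v =>
    by_cases h1 : v = "critical"
    · subst h1; simp [pvSev, ho, PySem.Dict.getD, pv_prio_get]
    · by_cases h2 : v = "high"
      · subst h2; simp [pvSev, ho, PySem.Dict.getD, pv_prio_get]
      · simp [pvSev, ho, PySem.Dict.getD, pv_prio_get, h1, h2]

theorem pv_high_point (f : List (String × String)) :
    ((PySem.Dict.getD pvPrio (pvSev f) 1 == 1) && (PySem.Dict.get? pvPrio (pvSev f)).isSome)
      = (PySem.Dict.get? (PySem.Dict.mk f) "severity" == some "high") := by
  cases ho : PySem.Dict.get? (PySem.Dict.mk f) "severity" with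
  | none => simp [pvSev, ho, PySem.Dict.getD, pv_prio_get]
  | some v =>
    by_cases h1 : v = "critical"
    · subst h1; simp [pvSev, ho, PySem.Dict.getD, pv_prio_get]
    · by_cases h2 : v = "high"
      · subst h2; simp [pvSev, ho, PySem.Dict.getD, pv_prio_get]
      · simp [pvSev, ho, PySem.Dict.getD, pv_prio_get, h1, h2]

theorem pv_key01 (f : List (String × String))
    (h : (PySem.Dict.get? pvPrio (pvSev f)).isSome = true) :
    PySem.Dict.getD pvPrio (pvSev f) 1 = 0 ∨ PySem.Dict.getD pvPrio (pvSev f) 1 = 1 := by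
  by_cases h1 : pvSev f = "critical"
  · left; simp [PySem.Dict.getD, pv_prio_get, h1]
  · by_cases h2 : pvSev f = "high"
    · right; simp [PySem.Dict.getD, pv_prio_get, h2]
    · exfalso; rw [pv_prio_get, if_neg h1, if_neg h2] at h; simp at h

theorem pv_label_eq (f : List (String × String)) (v : String) (l : String)
    (ho : PySem.Dict.get? (PySem.Dict.mk f) "severity" = some v)
    (hl : PySem.Dict.get? pvLabel v = some l) :
    PySem.Dict.getD pvLabel (pvSev f) "" = l := by
  simp [pvSev, ho, PySem.Dict.getD, hl]

-- ===== VERDICT (by name: the statement is the Claim_ definition above) =====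
theorem format_email_py_spec : Claim_equal_format_email_py := by
  intro findings _ _
  unfold Spec_format_email_py format_email_py format_email_py_alt
  simp only [List.foldl_cons, List.foldl_nil]
  have hkey : ∀ f ∈ findings.filter (fun f => (PySem.Dict.get? pvPrio (pvSev f)).isSome),
      PySem.Dict.getD pvPrio (pvSev f) 1 = 0 ∨ PySem.Dict.getD pvPrio (pvSev f) 1 = 1 := by
    intro f hf
    exact pv_key01 f (by simpa using (List.mem_filter.mp hf).2)
  rw [pv_sorted_two_valued _ _ hkey, List.filter_filter, List.filter_filter,
      List.filter_congr (fun f _ => pv_crit_point f),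
      List.filter_congr (fun f _ => pv_high_point f)]
  rw [PySem.List.foldl_append_eq_flatMap, PySem.List.foldl_append_eq_flatMap,
      PySem.List.foldl_append_eq_flatMap, List.flatMap_append]
  have hC : (findings.filter (fun f => PySem.Dict.get? (PySem.Dict.mk f) "severity" == some "critical")).flatMap
        (fun f => ["[" ++ PySem.Dict.getD pvLabel (pvSev f) "" ++ "] " ++ PySem.Dict.getD (PySem.Dict.mk f) "title" "",
                "  Location: " ++ PySem.Dict.getD (PySem.Dict.mk f) "location" "?",
                "  Detail:   " ++ PySem.Dict.getD (PySem.Dict.mk f) "detail" "",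
                "  Fix:      " ++ PySem.Dict.getD (PySem.Dict.mk f) "fix" "",
                ""])
      = (findings.filter (fun f => PySem.Dict.get? (PySem.Dict.mk f) "severity" == some "critical")).flatMap
        (fun f => ["[" ++ "CRITICAL" ++ "] " ++ PySem.Dict.getD (PySem.Dict.mk f) "title" "",
                "  Location: " ++ PySem.Dict.getD (PySem.Dict.mk f) "location" "?",
                "  Detail:   " ++ PySem.Dict.getD (PySem.Dict.mk f) "detail" "",
                "  Fix:      " ++ PySem.Dict.getD (PySem.Dict.mk f) "fix" "",
                ""]) := by
    apply pv_flatMap_congr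
    intro f hf
    have ho : PySem.Dict.get? (PySem.Dict.mk f) "severity" = some "critical" := by
      simpa using (List.mem_filter.mp hf).2
    simp [pv_label_eq f "critical" "CRITICAL" ho (by decide)]
  have hH : (findings.filter (fun f => PySem.Dict.get? (PySem.Dict.mk f) "severity" == some "high")).flatMap
        (fun f => ["[" ++ PySem.Dict.getD pvLabel (pvSev f) "" ++ "] " ++ PySem.Dict.getD (PySem.Dict.mk f) "title" "",
                "  Location: " ++ PySem.Dict.getD (PySem.Dict.mk f) "location" "?",
                "  Detail:   " ++ PySem.Dict.getD (PySem.Dict.mk f) "detail" "",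
                "  Fix:      " ++ PySem.Dict.getD (PySem.Dict.mk f) "fix" "",
                ""])
      = (findings.filter (fun f => PySem.Dict.get? (PySem.Dict.mk f) "severity" == some "high")).flatMap
        (fun f => ["[" ++ "HIGH" ++ "] " ++ PySem.Dict.getD (PySem.Dict.mk f) "title" "",
                "  Location: " ++ PySem.Dict.getD (PySem.Dict.mk f) "location" "?",
                "  Detail:   " ++ PySem.Dict.getD (PySem.Dict.mk f) "detail" "",
                "  Fix:      " ++ PySem.Dict.getD (PySem.Dict.mk f) "fix" "",
                ""]) := by
    apply pv_flatMap_congr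
    intro f hf
    have ho : PySem.Dict.get? (PySem.Dict.mk f) "severity" = some "high" := by
      simpa using (List.mem_filter.mp hf).2
    simp [pv_label_eq f "high" "HIGH" ho (by decide)]
  rw [hC, hH]
  simp
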